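-- pv_equiv track=rewrite | github.com/almogd113/Home-exercise-mamas | exercise_algorithms/is_sorted_polyndrom.py | is_sorted_polyndrom
-- ===== SOURCE A (Python) =====
-- def check_type_order(order_descending: bool, my_part_str: str) -> bool:
--     # create a sorted version of this string
--     sorted_version = [my_part_str[index] for index in range(len(my_part_str))]
--     sorted_version.sort(reverse=order_descending)
--
--     # check equality between the versions
--     return get_bool_equal_strings(my_part_str, sorted_version)
--
-- def get_bool_equal_strings(my_part_str: str, sorted_version: []) -> bool:
--     length = len(my_part_str)
--     for index in range(length):
--         if sorted_version[index] != my_part_str[index]: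
--             return False
--     return True
--
-- def is_sorted_polyndrom(my_str: str) -> bool:
--     # checking palindrome with ASCII code
--     # each of half of the word should be in a sorted way
--     # the first half - in ascending order
--     # the second half - in descending order
--
--     # check if str is palindrome
--     last_index = len(my_str) - 1
--     for index in range(int(len(my_str) / 2)):
--         if not my_str[index] == my_str[last_index - index]:
--             return False
--
--     # check orders
--     first_half = my_str[0:int(len(my_str) / 2) + 1:1]
--     check_first_half_order = check_type_order(order_descending=False, my_part_str=first_half)
--     second_half = my_str[int(len(my_str) / 2): len(my_str): 1]
--     check_second_half_order = check_type_order(order_descending=True, my_part_str=second_half)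
--
--     return check_second_half_order and check_first_half_order
-- ===== SOURCE B (Python) =====
-- def is_sorted_polyndrom(my_str: str) -> bool:
--     # single linear pass: mirror equality and adjacent non-decreasing order in the first half
--     n = len(my_str)
--     half = n // 2
--     for i in range(half):
--         if my_str[i] != my_str[n - 1 - i]:
--             return False
--         if my_str[i] > my_str[i + 1]:
--             return False
--     return True
-- ===== Notes on version B (the rewrite author's own statement) =====
-- stated objective: faster
-- what changed: A sorts each half and compares it with the slice (plus a separate palindrome loop over index pairs); B makes one linear pass over the first half checking mirror equality and adjacent non-decreasing order, with no sorting, slicing or copies.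
import Mathlib
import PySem

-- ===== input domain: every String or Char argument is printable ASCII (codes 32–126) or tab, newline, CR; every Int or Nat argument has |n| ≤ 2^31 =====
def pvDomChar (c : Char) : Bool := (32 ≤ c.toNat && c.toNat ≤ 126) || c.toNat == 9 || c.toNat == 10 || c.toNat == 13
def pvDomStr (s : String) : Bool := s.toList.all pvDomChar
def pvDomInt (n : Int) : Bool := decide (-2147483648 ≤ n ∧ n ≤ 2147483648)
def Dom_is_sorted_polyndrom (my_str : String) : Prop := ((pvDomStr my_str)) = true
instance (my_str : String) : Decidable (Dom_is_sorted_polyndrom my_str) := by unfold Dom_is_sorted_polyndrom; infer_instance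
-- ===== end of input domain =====

-- B replaces A's sort-and-compare of both halves by one linear pass over the first half
-- checking mirror equality and adjacent order (objective: faster).

-- ===== PORT A =====
-- sorted_version = [my_part_str[i] for i in range(len(my_part_str))]; .sort(reverse=order_descending)
def pvA_sortedVersion (part : List Char) (desc : Bool) : List Char :=
  PySem.List.sorted ((PySem.List.pyRange 0 (PySem.List.len part) 1).map
    (fun i => PySem.List.pyGetD part i ' ')) (fun x => x) desc

-- the 'for index in range(length): if sorted_version[index] != my_part_str[index]: return False' loop
def pvA_eqLoop (part sortedv : List Char) : List Int → Bool
  | [] => true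
  | i :: rest =>
    if PySem.List.pyGetD sortedv i ' ' ≠ PySem.List.pyGetD part i ' ' then false
    else pvA_eqLoop part sortedv rest

def pvA_get_bool_equal_strings (part sortedv : List Char) : Bool :=
  pvA_eqLoop part sortedv (PySem.List.pyRange 0 (PySem.List.len part) 1)

def pvA_check_type_order (desc : Bool) (part : List Char) : Bool :=
  pvA_get_bool_equal_strings part (pvA_sortedVersion part desc)

-- the 'for index in range(int(len/2)): if not s[index] == s[last_index - index]: return False' loop
def pvA_palLoop (cs : List Char) (lastIdx : Int) : List Int → Bool
  | [] => true
  | i :: rest =>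
    if !(PySem.List.pyGetD cs i ' ' == PySem.List.pyGetD cs (lastIdx - i) ' ') then false
    else pvA_palLoop cs lastIdx rest

-- int(len(my_str)/2) is float division in Python; it equals len // 2 exactly for every
-- length below 2^52, hence on all realisable inputs — ported as floordiv.
def is_sorted_polyndrom (my_str : String) : Bool :=
  let cs := my_str.toList
  let lastIdx : Int := PySem.List.len cs - 1
  let half : Int := PySem.Int.floordiv (PySem.List.len cs) 2
  if pvA_palLoop cs lastIdx (PySem.List.pyRange 0 half 1) then
    -- my_str[0 : half+1 : 1] and my_str[half : len : 1]; with step 1 these are the plain slices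
    let firstHalf := PySem.List.slice cs (some 0) (some (half + 1))
    let checkFirst := pvA_check_type_order false firstHalf
    let secondHalf := PySem.List.slice cs (some half) (some (PySem.List.len cs))
    let checkSecond := pvA_check_type_order true secondHalf
    checkSecond && checkFirst
  else false

-- ===== PORT B =====
-- single pass over i in range(n // 2): mirror equality and adjacent non-decreasing order
def pvB_loop (cs : List Char) (n : Nat) : List Nat → Bool
  | [] => true
  | i :: rest =>
    if cs.getD i ' ' ≠ cs.getD (n - 1 - i) ' ' then false
    else if cs.getD i ' ' > cs.getD (i + 1) ' ' then false
    else pvB_loop cs n rest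

def is_sorted_polyndrom_alt (my_str : String) : Bool :=
  let cs := my_str.toList
  let n := cs.length
  pvB_loop cs n (List.range (n / 2))

-- ===== PRECONDITION & SPEC =====
def Spec_is_sorted_polyndrom (my_str : String) (out : Bool) : Prop := out = is_sorted_polyndrom_alt my_str
instance (my_str : String) (out : Bool) : Decidable (Spec_is_sorted_polyndrom my_str out) := by unfold Spec_is_sorted_polyndrom; infer_instance

-- ===== CLAIM (what is proved, stated in full; the proofs are below) =====
def Claim_equal_is_sorted_polyndrom : Prop := ∀ (my_str : String), Dom_is_sorted_polyndrom my_str → Spec_is_sorted_polyndrom my_str (is_sorted_polyndrom my_str)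

-- ===== LEMMAS AND PROOFS =====

-- the common characterisation both programs decide
def MirrorP (cs : List Char) : Prop :=
  ∀ k, k < cs.length / 2 → cs.getD k ' ' = cs.getD (cs.length - 1 - k) ' '

def AscP (cs : List Char) : Prop :=
  ∀ k, k < cs.length / 2 → cs.getD k ' ' ≤ cs.getD (k + 1) ' '

-- the three early-return loops are 'all' folds
lemma pvA_eqLoop_eq_all (part sortedv : List Char) (l : List Int) :
    pvA_eqLoop part sortedv l =
      l.all (fun i => PySem.List.pyGetD sortedv i ' ' == PySem.List.pyGetD part i ' ') := by
  induction l with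
  | nil => rfl
  | cons i rest ih => by_cases h : PySem.List.pyGetD sortedv i ' ' = PySem.List.pyGetD part i ' ' <;>
      simp [pvA_eqLoop, h, ih]

lemma pvA_palLoop_eq_all (cs : List Char) (lastIdx : Int) (l : List Int) :
    pvA_palLoop cs lastIdx l =
      l.all (fun i => PySem.List.pyGetD cs i ' ' == PySem.List.pyGetD cs (lastIdx - i) ' ') := by
  induction l with
  | nil => rfl
  | cons i rest ih => by_cases h : PySem.List.pyGetD cs i ' ' = PySem.List.pyGetD cs (lastIdx - i) ' ' <;>
      simp [pvA_palLoop, h, ih]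

lemma pvB_loop_eq_all (cs : List Char) (n : Nat) (l : List Nat) :
    pvB_loop cs n l =
      l.all (fun i => (decide (cs.getD i ' ' = cs.getD (n - 1 - i) ' ')) &&
                      !(cs.getD (i + 1) ' ' < cs.getD i ' ')) := by
  induction l with
  | nil => rfl
  | cons i rest ih => simp [pvB_loop, ih, Bool.and_assoc]

lemma B_iff (s : String) :
    is_sorted_polyndrom_alt s = true ↔ MirrorP s.toList ∧ AscP s.toList := by
  simp only [is_sorted_polyndrom_alt]
  rw [pvB_loop_eq_all]
  simp only [List.all_eq_true, List.mem_range, MirrorP, AscP, Bool.and_eq_true, decide_eq_true_eq,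
    Bool.not_eq_eq_eq_not, Bool.not_true, decide_eq_false_iff_not, not_lt]
  constructor
  · intro h; exact ⟨fun k hk => (h k hk).1, fun k hk => (h k hk).2⟩
  · intro ⟨h1, h2⟩ k hk; exact ⟨h1 k hk, h2 k hk⟩

-- check_type_order desc part is 'sorted(part, reverse=desc) == part'
lemma cto_iff (desc : Bool) (part : List Char) :
    pvA_check_type_order desc part = true ↔
      PySem.List.sorted part (fun x => x) desc = part := by
  unfold pvA_check_type_order pvA_get_bool_equal_strings pvA_sortedVersion
  rw [PySem.List.map_pyGetD_pyRange_zero part ' ', pvA_eqLoop_eq_all]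
  have hlen : (PySem.List.sorted part (fun x => x) desc).length = part.length :=
    (PySem.List.sorted_perm part (fun x => x) desc).length_eq
  rw [PySem.List.pyRange_one]
  simp only [List.all_map, List.all_eq_true, List.mem_range, Function.comp, zero_add,
    PySem.List.pyGetD_natCast, beq_iff_eq]
  constructor
  · intro h
    apply List.ext_getElem hlen
    intro k hk1 hk2
    have := h k (by simpa using hk2)
    rwa [List.getD_eq_getElem _ _ hk1, List.getD_eq_getElem _ _ hk2] at this
  · intro heq k hk
    rw [heq]

lemma sorted_asc_iff (part : List Char) :
    PySem.List.sorted part (fun x => x) false = part ↔ part.Pairwise (· ≤ ·) := by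
  constructor
  · intro h; have := PySem.List.sorted_pairwise part (fun x => x); rwa [h] at this
  · intro h; exact PySem.List.sorted_eq_self_of_pairwise part (fun x => x) h

lemma sorted_desc_iff (part : List Char) :
    PySem.List.sorted part (fun x => x) true = part ↔ part.Pairwise (fun a b => b ≤ a) := by
  constructor
  · intro h; have := PySem.List.sorted_pairwise_rev part (fun x => x); rwa [h] at this
  · intro h; exact PySem.List.sorted_rev_eq_self_of_pairwise part (fun x => x) h

lemma pal_iff (cs : List Char) :
    pvA_palLoop cs (PySem.List.len cs - 1)
      (PySem.List.pyRange 0 (PySem.Int.floordiv (PySem.List.len cs) 2) 1) = true ↔ MirrorP cs := by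
  rw [pvA_palLoop_eq_all, PySem.List.pyRange_one]
  simp only [PySem.List.len_eq, List.all_map, List.all_eq_true, List.mem_range, Function.comp,
    zero_add, beq_iff_eq, sub_zero]
  have hfd : PySem.Int.floordiv (cs.length : Int) 2 = ((cs.length / 2 : Nat) : Int) := by
    exact_mod_cast PySem.Int.floordiv_natCast cs.length 2
  have hcnt : ((PySem.Int.floordiv (cs.length : Int) 2)).toNat = cs.length / 2 := by
    rw [hfd]; omega
  rw [hcnt]
  unfold MirrorP
  constructor
  · intro h k hk
    have hh := h k hk
    have he : ((cs.length : Int) - 1 - (k : Int)) = ((cs.length - 1 - k : Nat) : Int) := by omega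
    rw [he, PySem.List.pyGetD_natCast, PySem.List.pyGetD_natCast] at hh
    exact hh
  · intro h k hk
    have he : ((cs.length : Int) - 1 - (k : Int)) = ((cs.length - 1 - k : Nat) : Int) := by omega
    rw [he, PySem.List.pyGetD_natCast, PySem.List.pyGetD_natCast]
    exact h k hk

lemma slice_first (cs : List Char) :
    PySem.List.slice cs (some 0) (some (PySem.Int.floordiv (PySem.List.len cs) 2 + 1)) =
      cs.take (cs.length / 2 + 1) := by
  rw [PySem.List.slice_zero_start]
  have he : PySem.Int.floordiv (PySem.List.len cs) 2 + 1 = ((cs.length / 2 + 1 : Nat) : Int) := by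
    rw [PySem.List.len_eq]
    have hfd : PySem.Int.floordiv (cs.length : Int) 2 = ((cs.length / 2 : Nat) : Int) := by
      exact_mod_cast PySem.Int.floordiv_natCast cs.length 2
    rw [hfd]; push_cast; ring
  rw [he, PySem.List.slice_to_natCast]

lemma slice_second (cs : List Char) :
    PySem.List.slice cs (some (PySem.Int.floordiv (PySem.List.len cs) 2)) (some (PySem.List.len cs)) =
      cs.drop (cs.length / 2) := by
  have he : PySem.Int.floordiv (PySem.List.len cs) 2 = ((cs.length / 2 : Nat) : Int) := by
    rw [PySem.List.len_eq]
    exact_mod_cast PySem.Int.floordiv_natCast cs.length 2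
  rw [he, PySem.List.len_eq, PySem.List.slice_natCast]
  apply List.take_of_length_le
  simp

lemma pairwise_of_adj {α : Type} (R : α → α → Prop) (ht : ∀ a b c, R a b → R b c → R a c)
    (l : List α) (h : ∀ i, (hi : i + 1 < l.length) → R (l[i]'(by omega)) (l[i+1]'hi)) :
    l.Pairwise R := by
  rw [List.pairwise_iff_getElem]
  intro i j hi hj hij
  induction j with
  | zero => omega
  | succ j ih =>
    rcases Nat.lt_succ_iff_lt_or_eq.mp hij with hlt | rfl
    · exact ht _ _ _ (ih (by omega) hlt) (h j hj)
    · exact h i hj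

-- a palindrome mirrors positions in the upper half onto the lower half
lemma mirror_high (cs : List Char) (hm : MirrorP cs) :
    ∀ m, cs.length / 2 ≤ m → m < cs.length →
      cs.getD m ' ' = cs.getD (cs.length - 1 - m) ' ' := by
  intro m h1 h2
  by_cases he : cs.length - 1 - m = m
  · rw [he]
  · have hj : cs.length - 1 - m < cs.length / 2 := by omega
    have h3 := hm (cs.length - 1 - m) hj
    have h4 : cs.length - 1 - (cs.length - 1 - m) = m := by omega
    rw [h4] at h3
    exact h3.symm

-- under the palindrome condition, A's two half-orderings collapse to B's adjacent scan
lemma key_iff (cs : List Char) (hm : MirrorP cs) :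
    AscP cs ↔ (cs.take (cs.length / 2 + 1)).Pairwise (· ≤ ·) ∧
              (cs.drop (cs.length / 2)).Pairwise (fun a b => b ≤ a) := by
  constructor
  · intro ha
    constructor
    · apply pairwise_of_adj (fun a b : Char => a ≤ b) (fun a b c hab hbc => le_trans hab hbc)
      intro i hi
      simp only [List.length_take] at hi
      simp only [List.getElem_take]
      have hb1 : i < cs.length := by omega
      have hb2 : i + 1 < cs.length := by omega
      rw [← List.getD_eq_getElem cs ' ' hb1, ← List.getD_eq_getElem cs ' ' hb2]
      exact ha i (by omega)
    · apply pairwise_of_adj (fun a b : Char => b ≤ a) (fun a b c hab hbc => le_trans hbc hab)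
      intro i hi
      simp only [List.length_drop] at hi
      simp only [List.getElem_drop]
      have hb1 : cs.length / 2 + i < cs.length := by omega
      have hb2 : cs.length / 2 + (i + 1) < cs.length := by omega
      rw [← List.getD_eq_getElem cs ' ' hb1, ← List.getD_eq_getElem cs ' ' hb2]
      rw [mirror_high cs hm (cs.length / 2 + (i + 1)) (by omega) hb2,
          mirror_high cs hm (cs.length / 2 + i) (by omega) hb1]
      have he : cs.length - 1 - (cs.length / 2 + i) =
          (cs.length - 1 - (cs.length / 2 + (i + 1))) + 1 := by omega
      rw [he]
      exact ha _ (by omega)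
  · intro ⟨h1, _⟩ k hk
    rw [List.pairwise_iff_getElem] at h1
    have hl : (cs.take (cs.length / 2 + 1)).length = cs.length / 2 + 1 := by
      rw [List.length_take]; omega
    have := h1 k (k + 1) (by omega) (by omega) (by omega)
    simp only [List.getElem_take] at this
    rwa [List.getD_eq_getElem cs ' ' (by omega), List.getD_eq_getElem cs ' ' (by omega)]

lemma A_iff (s : String) :
    is_sorted_polyndrom s = true ↔ MirrorP s.toList ∧ AscP s.toList := by
  simp only [is_sorted_polyndrom]
  by_cases hp : pvA_palLoop s.toList (PySem.List.len s.toList - 1)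
      (PySem.List.pyRange 0 (PySem.Int.floordiv (PySem.List.len s.toList) 2) 1) = true
  · rw [if_pos hp, Bool.and_eq_true, cto_iff, cto_iff, slice_first, slice_second,
      sorted_asc_iff, sorted_desc_iff]
    have hm := (pal_iff s.toList).mp hp
    constructor
    · rintro ⟨h2, h1⟩; exact ⟨hm, (key_iff s.toList hm).mpr ⟨h1, h2⟩⟩
    · rintro ⟨_, ha⟩
      have hk := (key_iff s.toList hm).mp ha
      exact ⟨hk.2, hk.1⟩
  · rw [if_neg hp]
    simp only [Bool.false_eq_true, false_iff]
    rintro ⟨hm, _⟩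
    exact hp ((pal_iff s.toList).mpr hm)

-- ===== VERDICT (by name: the statement is the Claim_ definition above) =====
theorem is_sorted_polyndrom_spec : Claim_equal_is_sorted_polyndrom := by
  intro s _
  unfold Spec_is_sorted_polyndrom
  have hiff := (A_iff s).trans (B_iff s).symm
  cases hA : is_sorted_polyndrom s <;> cases hB : is_sorted_polyndrom_alt s <;> simp_all
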